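-- pv_equiv track=rewrite | github.com/Kyle-Meyer/Interweaving-Python | signal_untangler/algorithm.py | count_comparisons
-- ===== SOURCE A (Python) =====
-- from collections import deque
--
-- def count_comparisons(s, x, y):
--     # Handle edge cases
--     if not s or not x or not y:
--         return 0
--
--     # Initialize counters
--     comparisons = 0
--     visited = set()
--     queue = deque([(0, 0, 0)])  # (s_pos, x_pos, y_pos)
--
--     while queue:
--         s_pos, x_pos, y_pos = queue.popleft()
--
--         if s_pos == len(s):
--             return comparisons
--
--         state = (s_pos, x_pos, y_pos)
--         if state in visited:
--             continue
--
--         visited.add(state)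
--
--         # Count comparison with x
--         comparisons += 1
--         if s[s_pos] == x[x_pos]:
--             next_x_pos = (x_pos + 1) % len(x)
--             queue.append((s_pos + 1, next_x_pos, y_pos))
--
--         # Count comparison with y
--         comparisons += 1
--         if s[s_pos] == y[y_pos]:
--             next_y_pos = (y_pos + 1) % len(y)
--             queue.append((s_pos + 1, x_pos, next_y_pos))
--
--     return comparisons
-- ===== SOURCE B (Python) =====
-- def count_comparisons(s, x, y):
--     if not s or not x or not y:
--         return 0
--     total = 0
--     frontier = {(0, 0)}
--     for ch in s:
--         total += 2 * len(frontier)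
--         nxt = set()
--         for xp, yp in frontier:
--             if ch == x[xp]:
--                 nxt.add(((xp + 1) % len(x), yp))
--             if ch == y[yp]:
--                 nxt.add((xp, (yp + 1) % len(y)))
--         frontier = nxt
--     return total
-- ===== Notes on version B (the rewrite author's own statement) =====
-- stated objective: simpler
-- what changed: Replaced the BFS with an explicit deque, visited set, per-pop comparison counter and early return by a layer-by-layer frontier iteration over s that keeps only the set of (x_pos,y_pos) offsets reachable at each position and adds 2*len(frontier) per layer (no queue, no per-state visited bookkeeping).
import Mathlib
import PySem

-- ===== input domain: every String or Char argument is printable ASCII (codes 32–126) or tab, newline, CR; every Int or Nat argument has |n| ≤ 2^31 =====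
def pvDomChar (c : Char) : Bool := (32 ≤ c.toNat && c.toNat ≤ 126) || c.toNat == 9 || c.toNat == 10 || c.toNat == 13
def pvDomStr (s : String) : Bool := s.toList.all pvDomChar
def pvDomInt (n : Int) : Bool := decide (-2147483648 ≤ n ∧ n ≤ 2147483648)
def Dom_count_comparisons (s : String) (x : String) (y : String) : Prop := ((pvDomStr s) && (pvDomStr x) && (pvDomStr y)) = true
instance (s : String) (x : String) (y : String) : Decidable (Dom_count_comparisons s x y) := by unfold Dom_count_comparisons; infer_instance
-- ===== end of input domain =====

-- B replaces A's BFS (deque + visited set + per-pop counter + early return) by a layer-by-layer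
-- frontier iteration over s, adding 2*len(frontier) per layer: simpler state, no queue, same value.

-- ===== PORT A =====
-- the while loop of A: fuel-indexed recursion; the fuel passed by count_comparisons below
-- always suffices (this is proved), so the 0-fuel branch is never reached
def bfsLoop (s x y : List Char) : Nat → Int → PySem.Set (Int × Int × Int) → List (Int × Int × Int) → Int
  | 0, comp, _, _ => comp
  | fuel + 1, comp, visited, queue =>
    match queue with
    | [] => comp
    | (sp, xp, yp) :: rest =>
      if sp == ((s.length : Nat) : Int) then comp
      else if PySem.Set.contains visited (sp, xp, yp) then bfsLoop s x y fuel comp visited rest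
      else
        let visited' := PySem.Set.add visited (sp, xp, yp)
        let rest1 := if PySem.List.pyGet? s sp == PySem.List.pyGet? x xp
          then rest ++ [(sp + 1, PySem.Int.mod (xp + 1) (x.length : Int), yp)] else rest
        let rest2 := if PySem.List.pyGet? s sp == PySem.List.pyGet? y yp
          then rest1 ++ [(sp + 1, xp, PySem.Int.mod (yp + 1) (y.length : Int))] else rest1
        bfsLoop s x y fuel (comp + 1 + 1) visited' rest2

def count_comparisons (s : String) (x : String) (y : String) : Int :=
  if s.toList = [] ∨ x.toList = [] ∨ y.toList = [] then 0
  else bfsLoop s.toList x.toList y.toList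
    (2 + 2 * (s.toList.length * (x.toList.length * y.toList.length)))
    0 PySem.Set.empty [(0, 0, 0)]

-- ===== PORT B =====
-- body of B's inner `for xp, yp in frontier` loop
def addSuccs (x y : List Char) (c : Char) (nxt : PySem.Set (Int × Int)) (p : Int × Int) : PySem.Set (Int × Int) :=
  let nxt1 := if some c == PySem.List.pyGet? x p.1
    then PySem.Set.add nxt (PySem.Int.mod (p.1 + 1) (x.length : Int), p.2) else nxt
  if some c == PySem.List.pyGet? y p.2
    then PySem.Set.add nxt1 (p.1, PySem.Int.mod (p.2 + 1) (y.length : Int)) else nxt1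

def stepF (x y : List Char) (c : Char) (frontier : PySem.Set (Int × Int)) : PySem.Set (Int × Int) :=
  frontier.foldl (addSuccs x y c) PySem.Set.empty

def count_comparisons_alt (s : String) (x : String) (y : String) : Int :=
  if s.toList = [] ∨ x.toList = [] ∨ y.toList = [] then 0
  else (s.toList.foldl
    (fun (acc : Int × PySem.Set (Int × Int)) c =>
      (acc.1 + 2 * (acc.2.length : Int), stepF x.toList y.toList c acc.2))
    (0, [(0, 0)])).1

-- ===== PRECONDITION & SPEC =====
def Spec_count_comparisons (s : String) (x : String) (y : String) (out : Int) : Prop := out = count_comparisons_alt s x y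
instance (s : String) (x : String) (y : String) (out : Int) : Decidable (Spec_count_comparisons s x y out) := by unfold Spec_count_comparisons; infer_instance

-- ===== CLAIM (what is proved, stated in full; the proofs are below) =====
def Claim_equal_count_comparisons : Prop := ∀ (s : String) (x : String) (y : String), Dom_count_comparisons s x y → Spec_count_comparisons s x y (count_comparisons s x y)

-- ===== LEMMAS AND PROOFS =====

-- mathematical layer: successor pairs, one frontier step as a Finset, layer k, sum of layer sizes
def succs (x y : List Char) (c : Char) (p : Int × Int) : Finset (Int × Int) :=
  (if some c = PySem.List.pyGet? x p.1 then {(PySem.Int.mod (p.1 + 1) (x.length : Int), p.2)} else ∅)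
  ∪ (if some c = PySem.List.pyGet? y p.2 then {(p.1, PySem.Int.mod (p.2 + 1) (y.length : Int))} else ∅)

def stepSet (x y : List Char) (c : Char) (S : Finset (Int × Int)) : Finset (Int × Int) :=
  S.biUnion (succs x y c)

def front (s x y : List Char) (k : Nat) : Finset (Int × Int) :=
  (s.take k).foldl (fun S c => stepSet x y c S) {(0, 0)}

def layersSum (x y : List Char) : List Char → Finset (Int × Int) → Nat
  | [], _ => 0
  | c :: cs, S => S.card + layersSum x y cs (stepSet x y c S)

def validP (x y : List Char) (p : Int × Int) : Prop :=
  0 ≤ p.1 ∧ p.1 < (x.length : Int) ∧ 0 ≤ p.2 ∧ p.2 < (y.length : Int)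

-- ---- B side ----
lemma mem_addSuccs (x y : List Char) (c : Char) (nxt : PySem.Set (Int × Int)) (p q : Int × Int) :
    q ∈ addSuccs x y c nxt p ↔ q ∈ nxt ∨ q ∈ succs x y c p := by
  simp only [addSuccs, succs, Finset.mem_union, beq_iff_eq]
  split_ifs with h1 h2 h2 <;>
    simp [PySem.Set.mem_add, Finset.mem_singleton]
  all_goals tauto

lemma nodup_addSuccs (x y : List Char) (c : Char) (nxt : PySem.Set (Int × Int)) (p : Int × Int)
    (h : nxt.Nodup) : (addSuccs x y c nxt p).Nodup := by
  unfold addSuccs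
  split_ifs <;> simp [PySem.Set.nodup_add, h]

lemma mem_foldl_addSuccs (x y : List Char) (c : Char) :
    ∀ (l : List (Int × Int)) (acc : PySem.Set (Int × Int)) (q : Int × Int),
      q ∈ l.foldl (addSuccs x y c) acc ↔ q ∈ acc ∨ ∃ p ∈ l, q ∈ succs x y c p := by
  intro l
  induction l with
  | nil => simp [List.foldl]
  | cons p l ih =>
    intro acc q
    simp only [List.foldl_cons, ih, mem_addSuccs, List.mem_cons]
    constructor
    · rintro (( h | h) | ⟨r, hr, hq⟩)
      · exact Or.inl h
      · exact Or.inr ⟨p, Or.inl rfl, h⟩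
      · exact Or.inr ⟨r, Or.inr hr, hq⟩
    · rintro (h | ⟨r, (rfl | hr), hq⟩)
      · exact Or.inl (Or.inl h)
      · exact Or.inl (Or.inr hq)
      · exact Or.inr ⟨r, hr, hq⟩

lemma nodup_foldl_addSuccs (x y : List Char) (c : Char) :
    ∀ (l : List (Int × Int)) (acc : PySem.Set (Int × Int)), acc.Nodup →
      (l.foldl (addSuccs x y c) acc).Nodup := by
  intro l
  induction l with
  | nil => intro acc h; simpa using h
  | cons p l ih => intro acc h; exact ih _ (nodup_addSuccs x y c acc p h)

def setRep (l : PySem.Set (Int × Int)) (S : Finset (Int × Int)) : Prop :=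
  l.Nodup ∧ ∀ q : Int × Int, q ∈ l ↔ q ∈ S

lemma length_of_setRep {l : PySem.Set (Int × Int)} {S : Finset (Int × Int)}
    (h : setRep l S) : l.length = S.card := by
  have ht : l.toFinset = S := by
    apply Finset.ext; intro a; simp [List.mem_toFinset, h.2]
  rw [← ht, List.toFinset_card_of_nodup h.1]

lemma setRep_stepF (x y : List Char) (c : Char) {l : PySem.Set (Int × Int)} {S : Finset (Int × Int)}
    (h : setRep l S) : setRep (stepF x y c l) (stepSet x y c S) := by
  constructor
  · exact nodup_foldl_addSuccs x y c l PySem.Set.empty (by simp [PySem.Set.empty])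
  · intro q
    rw [stepF, mem_foldl_addSuccs]
    simp only [PySem.Set.empty, List.not_mem_nil, false_or, stepSet, Finset.mem_biUnion]
    constructor
    · rintro ⟨p, hp, hq⟩; exact ⟨p, (h.2 p).1 hp, hq⟩
    · rintro ⟨p, hp, hq⟩; exact ⟨p, (h.2 p).2 hp, hq⟩

lemma foldB (x y : List Char) :
    ∀ (cs : List Char) (t : Int) (l : PySem.Set (Int × Int)) (S : Finset (Int × Int)),
      setRep l S →
      (cs.foldl
        (fun (acc : Int × PySem.Set (Int × Int)) c =>
          (acc.1 + 2 * (acc.2.length : Int), stepF x y c acc.2)) (t, l)).1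
        = t + 2 * (layersSum x y cs S : Int) := by
  intro cs
  induction cs with
  | nil => intro t l S _; simp [layersSum]
  | cons c cs ih =>
    intro t l S h
    simp only [List.foldl_cons, layersSum]
    rw [ih _ _ _ (setRep_stepF x y c h), length_of_setRep h]
    push_cast; ring

-- ---- A side ----
lemma succs_valid (x y : List Char) (hx : x ≠ []) (hy : y ≠ []) (c : Char) (p q : Int × Int)
    (hp : validP x y p) (hq : q ∈ succs x y c p) : validP x y q := by
  have hx' : (0 : Int) < (x.length : Int) := by
    have := List.length_pos_iff.mpr hx; exact_mod_cast this
  have hy' : (0 : Int) < (y.length : Int) := by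
    have := List.length_pos_iff.mpr hy; exact_mod_cast this
  obtain ⟨hp1, hp2, hp3, hp4⟩ := hp
  simp only [succs, Finset.mem_union] at hq
  rcases hq with hq | hq <;> split_ifs at hq <;> simp at hq <;> subst hq <;>
    exact ⟨by first
      | exact PySem.Int.mod_nonneg _ hx'
      | exact hp1, by first
      | exact PySem.Int.mod_lt _ hx'
      | exact hp2, by first
      | exact PySem.Int.mod_nonneg _ hy'
      | exact hp3, by first
      | exact PySem.Int.mod_lt _ hy'
      | exact hp4⟩

lemma stepSet_valid (x y : List Char) (hx : x ≠ []) (hy : y ≠ []) (c : Char)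
    (S : Finset (Int × Int)) (h : ∀ p ∈ S, validP x y p) :
    ∀ q ∈ stepSet x y c S, validP x y q := by
  intro q hq
  rw [stepSet, Finset.mem_biUnion] at hq
  obtain ⟨p, hp, hq⟩ := hq
  exact succs_valid x y hx hy c p q (h p hp) hq

lemma foldl_stepSet_valid (x y : List Char) (hx : x ≠ []) (hy : y ≠ []) :
    ∀ (cs : List Char) (S : Finset (Int × Int)), (∀ p ∈ S, validP x y p) →
      ∀ p ∈ cs.foldl (fun S c => stepSet x y c S) S, validP x y p := by
  intro cs
  induction cs with
  | nil => intro S h; simpa using h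
  | cons c cs ih =>
    intro S h
    exact ih _ (stepSet_valid x y hx hy c S h)

lemma front_valid (s x y : List Char) (hx : x ≠ []) (hy : y ≠ []) (k : Nat) :
    ∀ p ∈ front s x y k, validP x y p := by
  have hx' : (0 : Int) < (x.length : Int) := by
    have := List.length_pos_iff.mpr hx; exact_mod_cast this
  have hy' : (0 : Int) < (y.length : Int) := by
    have := List.length_pos_iff.mpr hy; exact_mod_cast this
  refine foldl_stepSet_valid x y hx hy (s.take k) {(0, 0)} ?_
  intro p hp
  simp only [Finset.mem_singleton] at hp
  subst hp
  exact ⟨le_refl _, hx', le_refl _, hy'⟩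

lemma card_le_of_valid (x y : List Char) (S : Finset (Int × Int))
    (h : ∀ p ∈ S, validP x y p) : S.card ≤ x.length * y.length := by
  have hsub : S ⊆ Finset.Ico (0 : Int) (x.length : Int) ×ˢ Finset.Ico (0 : Int) (y.length : Int) := by
    intro p hp
    obtain ⟨h1, h2, h3, h4⟩ := h p hp
    simp only [Finset.mem_product, Finset.mem_Ico]
    exact ⟨⟨h1, h2⟩, ⟨h3, h4⟩⟩
  calc S.card ≤ _ := Finset.card_le_card hsub
    _ = x.length * y.length := by
        rw [Finset.card_product, Int.card_Ico, Int.card_Ico]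
        simp

lemma front_succ (s x y : List Char) (k : Nat) (hk : k < s.length) :
    front s x y (k + 1) = stepSet x y (s[k]'hk) (front s x y k) := by
  unfold front
  rw [← List.take_concat_get (h := hk), List.concat_eq_append, List.foldl_append]
  simp

lemma layersSum_drop (s x y : List Char) (k : Nat) (hk : k < s.length) :
    layersSum x y (s.drop k) (front s x y k)
      = (front s x y k).card + layersSum x y (s.drop (k + 1)) (front s x y (k + 1)) := by
  rw [List.drop_eq_getElem_cons hk, layersSum, front_succ s x y k hk]

lemma layersSum_le (x y : List Char) (hx : x ≠ []) (hy : y ≠ []) :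
    ∀ (cs : List Char) (S : Finset (Int × Int)), (∀ p ∈ S, validP x y p) →
      layersSum x y cs S ≤ cs.length * (x.length * y.length) := by
  intro cs
  induction cs with
  | nil => intro S _; simp [layersSum]
  | cons c cs ih =>
    intro S h
    have h1 : S.card ≤ x.length * y.length := card_le_of_valid x y S h
    have h2 := ih _ (stepSet_valid x y hx hy c S h)
    simp only [layersSum, List.length_cons]
    nlinarith

-- the BFS invariant: processing layer k (q1 = unpopped layer-k states, q2 = already enqueued
-- layer-(k+1) states = successors of the visited part W of layer k) yields exactly
-- 2 * |layer k \ W| + 2 * (sum of sizes of the later layers) additional comparisons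
lemma bfs_layers (s x y : List Char) :
    ∀ (m k : Nat), k + m = s.length → ∀ (hk : k < s.length),
    ∀ (q1 : List (Int × Int × Int)) (fuel : Nat) (W : Finset (Int × Int))
      (vis : PySem.Set (Int × Int × Int)) (q2 : List (Int × Int × Int)) (comp : Int),
      (∀ p ∈ W, p ∈ front s x y k) →
      (∀ p : Int × Int, ((k : Int), p) ∈ vis ↔ p ∈ W) →
      (∀ (j : Nat) (p : Int × Int), k < j → ((j : Int), p) ∉ vis) →
      (∀ st ∈ q1, st.1 = (k : Int) ∧ st.2 ∈ front s x y k) →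
      (∀ p ∈ front s x y k, p ∈ W ∨ ((k : Int), p) ∈ q1) →
      (∀ st ∈ q2, st.1 = (k : Int) + 1) →
      (∀ p : Int × Int, ((k : Int) + 1, p) ∈ q2 ↔ p ∈ stepSet x y (s[k]'hk) W) →
      q1.length + q2.length + 2 * ((front s x y k) \ W).card
        + 2 * layersSum x y (s.drop (k + 1)) (front s x y (k + 1)) + 1 ≤ fuel →
      bfsLoop s x y fuel comp vis (q1 ++ q2)
        = comp + 2 * ((((front s x y k) \ W).card : Nat) : Int)
            + 2 * ((layersSum x y (s.drop (k + 1)) (front s x y (k + 1)) : Nat) : Int) := by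
  intro m
  induction m with
  | zero => intro k hkm hk; omega
  | succ m ih =>
    intro k hkm hk q1
    induction q1 with
    | nil =>
      intro fuel W vis q2 comp hWsub hvisk hvisf hq1 hcov hq2a hq2b hfuel
      have hWeq : W = front s x y k := by
        apply Finset.ext
        intro p
        constructor
        · exact hWsub p
        · intro hp
          rcases hcov p hp with h | h
          · exact h
          · simp at h
      have hdiff : front s x y k \ W = ∅ := by rw [hWeq]; exact Finset.sdiff_self _
      by_cases hkn : k + 1 < s.length
      · have hfs : front s x y (k + 1) = stepSet x y (s[k]'hk) W := by
          rw [hWeq]; exact front_succ s x y k hk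
        have hL1 : layersSum x y (s.drop (k + 1)) (front s x y (k + 1))
            = (front s x y (k + 1)).card
              + layersSum x y (s.drop (k + 1 + 1)) (front s x y (k + 1 + 1)) :=
          layersSum_drop s x y (k + 1) hkn
        have hcast : (((k + 1 : Nat) : Int)) = (k : Int) + 1 := by push_cast; ring
        have hmain := ih (k + 1) (by omega) hkn q2 fuel ∅ vis [] comp
          (by simp)
          (by intro p; rw [hcast]
              simp only [Finset.notMem_empty, iff_false]
              exact hvisf (k + 1) p (by omega))
          (by intro j p hj; exact hvisf j p (by omega))
          (by intro st hst
              refine ⟨by rw [hcast]; exact hq2a st hst, ?_⟩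
              have h1 : st.1 = (k : Int) + 1 := hq2a st hst
              have h2 : ((k : Int) + 1, st.2) ∈ q2 := by
                rw [← h1, Prod.mk.eta]; exact hst
              rw [hfs]
              exact (hq2b st.2).mp h2)
          (by intro p hp
              right
              rw [hcast]
              exact (hq2b p).mpr (by rw [← hfs]; exact hp))
          (by intro st hst; simp at hst)
          (by intro p
              simp [stepSet])
          (by rw [Finset.sdiff_empty]
              simp only [List.length_nil] at hfuel ⊢
              omega)
        rw [List.nil_append]
        rw [List.append_nil] at hmain
        rw [hmain, hdiff, Finset.sdiff_empty, hL1]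
        simp only [Finset.card_empty, Nat.cast_zero, Nat.cast_add]
        push_cast
        ring
      · -- k + 1 = s.length : every queue entry has s_pos = len(s); the loop returns comp
        have hkn' : k + 1 = s.length := by omega
        have hL1 : layersSum x y (s.drop (k + 1)) (front s x y (k + 1)) = 0 := by
          rw [List.drop_of_length_le (by omega)]
          rfl
        have hf1 : 1 ≤ fuel := by omega
        obtain ⟨f, rfl⟩ : ∃ f, fuel = f + 1 := ⟨fuel - 1, by omega⟩
        rw [List.nil_append, hdiff, hL1]
        match q2, hq2a with
        | [], _ => simp [bfsLoop]
        | (sp, xp, yp) :: r2, hq2a =>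
          have hsp : sp = (k : Int) + 1 := (hq2a (sp, xp, yp) (by simp))
          have : (sp == ((s.length : Nat) : Int)) = true := by
            rw [beq_iff_eq, hsp, ← hkn']; push_cast; ring
          simp [bfsLoop, this]
    | cons st rest ihq =>
      intro fuel W vis q2 comp hWsub hvisk hvisf hq1 hcov hq2a hq2b hfuel
      obtain ⟨sp, xp, yp⟩ := st
      have hsp : sp = (k : Int) := (hq1 _ (List.mem_cons_self)).1
      have hpf : (xp, yp) ∈ front s x y k := (hq1 _ (List.mem_cons_self)).2
      have hspne : (sp == ((s.length : Nat) : Int)) = false := by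
        rw [beq_eq_false_iff_ne, hsp]
        intro h
        have : k = s.length := by exact_mod_cast h
        omega
      obtain ⟨f, rfl⟩ : ∃ f, fuel = f + 1 := ⟨fuel - 1, by omega⟩
      have hget : PySem.List.pyGet? s sp = some (s[k]'hk) := by
        rw [hsp, PySem.List.pyGet?_natCast, List.getElem?_eq_getElem hk]
      rw [List.cons_append]
      by_cases hmem : (xp, yp) ∈ W
      · have hvm : (sp, xp, yp) ∈ vis := by
          rw [hsp]; exact (hvisk _).mpr hmem
        have hc : PySem.Set.contains vis (sp, xp, yp) = true := by
          rw [PySem.Set.contains_iff]; exact hvm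
        have hrec : bfsLoop s x y (f + 1) comp vis ((sp, xp, yp) :: (rest ++ q2))
            = bfsLoop s x y f comp vis (rest ++ q2) := by
          simp only [bfsLoop, hspne, Bool.false_eq_true, if_false, hc, if_true]
        rw [hrec]
        refine ihq f W vis q2 comp hWsub hvisk hvisf
          (fun st h => hq1 st (List.mem_cons_of_mem _ h)) ?_ hq2a hq2b ?_
        · intro p hp
          rcases hcov p hp with h | h
          · exact Or.inl h
          · rcases List.mem_cons.mp h with h | h
            · have : p = (xp, yp) := by
                have := congrArg Prod.snd h
                simpa using this
              exact Or.inl (this ▸ hmem)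
            · exact Or.inr h
        · simp only [List.length_cons] at hfuel
          omega
      · have hc : PySem.Set.contains vis (sp, xp, yp) = false := by
          rw [Bool.eq_false_iff]
          intro h
          rw [PySem.Set.contains_iff, hsp] at h
          exact hmem ((hvisk _).mp h)
        set c := s[k]'hk with hc_def
        set a1 : Int × Int × Int := (sp + 1, PySem.Int.mod (xp + 1) (x.length : Int), yp) with ha1
        set a2 : Int × Int × Int := (sp + 1, xp, PySem.Int.mod (yp + 1) (y.length : Int)) with ha2
        set news : List (Int × Int × Int) :=
          (if (some c == PySem.List.pyGet? x xp) then [a1] else [])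
            ++ (if (some c == PySem.List.pyGet? y yp) then [a2] else []) with hnews
        have hrec : bfsLoop s x y (f + 1) comp vis ((sp, xp, yp) :: (rest ++ q2))
            = bfsLoop s x y f (comp + 1 + 1) (PySem.Set.add vis (sp, xp, yp))
                (rest ++ (q2 ++ news)) := by
          simp only [bfsLoop, hspne, Bool.false_eq_true, if_false, hc, hget, hnews]
          split_ifs with h1 h2 h2 <;> simp [List.append_assoc, ← ha1, ← ha2]
        rw [hrec]
        have hnewsfst : ∀ st ∈ news, st.1 = (k : Int) + 1 := by
          intro st hst
          rw [hnews] at hst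
          rcases List.mem_append.mp hst with h | h <;> split_ifs at h <;> simp at h <;>
            · subst h
              simp [ha1, ha2, hsp]
        have hnewsmem : ∀ p : Int × Int, ((k : Int) + 1, p) ∈ news ↔ p ∈ succs x y c (xp, yp) := by
          intro p
          have hx1 : (((k : Int) + 1, p) = a1) ↔ p = (PySem.Int.mod (xp + 1) (x.length : Int), yp) := by
            rw [ha1, hsp, Prod.ext_iff]; simp
          have hy1 : (((k : Int) + 1, p) = a2) ↔ p = (xp, PySem.Int.mod (yp + 1) (y.length : Int)) := by
            rw [ha2, hsp, Prod.ext_iff]; simp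
          rw [hnews]
          simp only [List.mem_append, succs, Finset.mem_union, beq_iff_eq]
          split_ifs with hgx hgy hgy <;>
            simp [hx1, hy1]
        have hmemd : (xp, yp) ∈ front s x y k \ W := Finset.mem_sdiff.mpr ⟨hpf, hmem⟩
        have hcard : (front s x y k \ insert (xp, yp) W).card
            = (front s x y k \ W).card - 1 := by
          rw [Finset.sdiff_insert, Finset.card_erase_of_mem hmemd]
        have hpos : 1 ≤ (front s x y k \ W).card :=
          Finset.card_pos.mpr ⟨_, hmemd⟩
        have hnewslen : news.length ≤ 2 := by
          rw [hnews]
          split_ifs <;> simp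
        have hmain := ihq f (insert (xp, yp) W) (PySem.Set.add vis (sp, xp, yp))
          (q2 ++ news) (comp + 1 + 1)
          (by intro q hq
              rcases Finset.mem_insert.mp hq with h | h
              · exact h ▸ hpf
              · exact hWsub q h)
          (by intro q
              rw [PySem.Set.mem_add, hvisk q, Finset.mem_insert, hsp, Prod.ext_iff]
              simp only [Prod.ext_iff]
              tauto)
          (by intro j q hj h
              rcases (PySem.Set.mem_add _ _ _).mp h with h | h
              · exact hvisf j q hj h
              · rw [Prod.ext_iff, hsp] at h
                have : (j : Int) = (k : Int) := h.1
                have : j = k := by exact_mod_cast this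
                omega)
          (fun st h => hq1 st (List.mem_cons_of_mem _ h))
          (by intro p hp
              rcases hcov p hp with h | h
              · exact Or.inl (Finset.mem_insert_of_mem h)
              · rcases List.mem_cons.mp h with h | h
                · have : p = (xp, yp) := by
                    have := congrArg Prod.snd h
                    simpa using this
                  exact Or.inl (this ▸ Finset.mem_insert_self _ _)
                · exact Or.inr h)
          (by intro st hst
              rcases List.mem_append.mp hst with h | h
              · exact hq2a st h
              · exact hnewsfst st h)
          (by intro p
              simp only [List.mem_append, hq2b p, hnewsmem p, stepSet, Finset.biUnion_insert,
                Finset.mem_union]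
              tauto)
          (by simp only [List.length_cons, List.length_append] at hfuel ⊢
              omega)
        rw [hmain, hcard]
        have : ((((front s x y k \ W).card - 1 : Nat)) : Int)
            = (((front s x y k \ W).card : Nat) : Int) - 1 := by
          omega
        rw [this]
        ring

lemma alt_closed (s x y : String) (hs : s.toList ≠ []) (hx : x.toList ≠ []) (hy : y.toList ≠ []) :
    count_comparisons_alt s x y
      = 2 * ((layersSum x.toList y.toList s.toList {(0, 0)} : Nat) : Int) := by
  unfold count_comparisons_alt
  rw [if_neg (by tauto)]
  rw [foldB x.toList y.toList s.toList 0 [(0, 0)] {(0, 0)} ⟨by simp, by simp⟩]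
  ring

-- ===== VERDICT (by name: the statement is the Claim_ definition above) =====
theorem count_comparisons_spec : Claim_equal_count_comparisons := by
  unfold Claim_equal_count_comparisons Spec_count_comparisons
  intro s x y _
  by_cases h : s.toList = [] ∨ x.toList = [] ∨ y.toList = []
  · unfold count_comparisons count_comparisons_alt
    rw [if_pos h, if_pos h]
  · rw [not_or, not_or] at h
    obtain ⟨hs, hx, hy⟩ := h
    have hk0 : 0 < s.toList.length := List.length_pos_iff.mpr hs
    have hfront0 : front s.toList x.toList y.toList 0 = {(0, 0)} := rfl
    have hL := layersSum_drop s.toList x.toList y.toList 0 hk0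
    rw [hfront0] at hL
    simp only [List.drop_zero, Finset.card_singleton] at hL
    have hLb := layersSum_le x.toList y.toList hx hy s.toList {(0, 0)}
      (by rw [← hfront0]; exact front_valid s.toList x.toList y.toList hx hy 0)
    have hmain := bfs_layers s.toList x.toList y.toList s.toList.length 0 (by omega) hk0
      [(0, 0, 0)] (2 + 2 * (s.toList.length * (x.toList.length * y.toList.length)))
      ∅ PySem.Set.empty [] 0
      (by simp)
      (by intro p; simp [PySem.Set.empty])
      (by intro j p hj; simp [PySem.Set.empty])
      (by intro st hst
          simp only [List.mem_singleton] at hst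
          subst hst
          exact ⟨by simp, by rw [hfront0]; simp⟩)
      (by intro p hp
          rw [hfront0] at hp
          simp only [Finset.mem_singleton] at hp
          subst hp
          simp)
      (by intro st hst; simp at hst)
      (by intro p; simp [stepSet])
      (by rw [hfront0]
          simp only [List.length_singleton, List.length_nil, Finset.sdiff_empty,
            Finset.card_singleton]
          omega)
    rw [List.append_nil, hfront0, Finset.sdiff_empty, Finset.card_singleton] at hmain
    unfold count_comparisons
    rw [if_neg (by tauto), hmain, alt_closed s x y hs hx hy, hL]
    push_cast
    ring
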